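-- pv_equiv track=rewrite | github.com/ELinda/content-utils | examples/stutterer.py | get_peak_onsets
-- ===== SOURCE A (Python) =====
-- def get_peak_onsets(keys, values, thres):
--     """ get keys where values are greater than thres,
--     omitting keys occurring contiguously after an onset key"""
--     last_peak = False
--     result = []
--
--     for k, v in zip(keys, values):
--         if v > thres and not last_peak:
--             result.append(k)
--
--         last_peak = v > thres
--
--     return result
-- ===== SOURCE B (Python) =====
-- def get_peak_onsets(keys, values, thres):
--     """ get keys where values are greater than thres,
--     omitting keys occurring contiguously after an onset key"""
--     pairs = list(zip(keys, values))
--     n = len(pairs)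
--     result = []
--     i = 0
--     while i < n:
--         # skip the run of values at or below thres
--         while i < n and pairs[i][1] <= thres:
--             i += 1
--         if i < n:
--             # start of an above-threshold run: record its key, then skip the run
--             result.append(pairs[i][0])
--             while i < n and pairs[i][1] > thres:
--                 i += 1
--     return result
-- ===== Notes on version B (the rewrite author's own statement) =====
-- stated objective: alternative
-- what changed: Replaces A's single pass with a maintained last_peak flag by a run-based scan: an outer loop that alternately skips a maximal at-or-below-threshold run and a maximal above-threshold run with inner index loops, recording the first key of each above run.
import Mathlib
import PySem

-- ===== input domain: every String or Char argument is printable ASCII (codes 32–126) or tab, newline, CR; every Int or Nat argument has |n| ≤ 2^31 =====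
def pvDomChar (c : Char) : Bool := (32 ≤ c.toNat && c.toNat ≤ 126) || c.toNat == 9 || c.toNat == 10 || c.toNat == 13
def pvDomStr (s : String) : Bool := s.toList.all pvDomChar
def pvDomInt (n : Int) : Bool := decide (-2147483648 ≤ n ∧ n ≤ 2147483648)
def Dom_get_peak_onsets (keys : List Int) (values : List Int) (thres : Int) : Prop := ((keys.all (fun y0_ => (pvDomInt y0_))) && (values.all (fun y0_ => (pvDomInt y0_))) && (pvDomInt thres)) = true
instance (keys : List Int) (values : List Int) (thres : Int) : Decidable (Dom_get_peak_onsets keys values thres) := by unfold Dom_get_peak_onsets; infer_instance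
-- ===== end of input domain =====

-- B replaces A's single pass with a last_peak flag by a run-based scan
-- (skip a below-run, record the head key of the next above-run, skip it,
-- repeat): an alternative decomposition of the same O(n) task.


-- ===== PORT A =====
-- loop over zip(keys, values) with state (last_peak, result); append on v > thres and not last_peak
def get_peak_onsets (keys : List Int) (values : List Int) (thres : Int) : List Int :=
  ((keys.zip values).foldl
    (fun (st : Bool × List Int) kv =>
      (decide (kv.2 > thres),
       if kv.2 > thres ∧ st.1 = false then st.2 ++ [kv.1] else st.2))
    (false, [])).2

-- ===== PORT B =====
-- inner while: advance i past the run of values at or below thres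
def pvSkipBelow (pairs : List (Int × Int)) (thres : Int) (i : Nat) : Nat :=
  if h : i < pairs.length ∧ (pairs.getD i (0, 0)).2 ≤ thres then
    pvSkipBelow pairs thres (i + 1)
  else i
termination_by pairs.length - i
decreasing_by omega

-- inner while: advance i past the run of values above thres
def pvSkipAbove (pairs : List (Int × Int)) (thres : Int) (i : Nat) : Nat :=
  if h : i < pairs.length ∧ (pairs.getD i (0, 0)).2 > thres then
    pvSkipAbove pairs thres (i + 1)
  else i
termination_by pairs.length - i
decreasing_by omega

theorem pvSkipBelow_ge (pairs : List (Int × Int)) (thres : Int) (i : Nat) :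
    i ≤ pvSkipBelow pairs thres i := by
  rw [pvSkipBelow]
  split
  · exact Nat.le_of_succ_le (pvSkipBelow_ge pairs thres (i + 1))
  · exact Nat.le_refl i
termination_by pairs.length - i
decreasing_by omega

theorem pvSkipAbove_ge (pairs : List (Int × Int)) (thres : Int) (i : Nat) :
    i ≤ pvSkipAbove pairs thres i := by
  rw [pvSkipAbove]
  split
  · exact Nat.le_of_succ_le (pvSkipAbove_ge pairs thres (i + 1))
  · exact Nat.le_refl i
termination_by pairs.length - i
decreasing_by omega

theorem pvSkipBelow_stop (pairs : List (Int × Int)) (thres : Int) (i : Nat)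
    (h : pvSkipBelow pairs thres i < pairs.length) :
    (pairs.getD (pvSkipBelow pairs thres i) (0, 0)).2 > thres := by
  rw [pvSkipBelow] at h ⊢
  split at h
  · rw [dif_pos ‹_›]
    exact pvSkipBelow_stop pairs thres (i + 1) h
  · rename_i hneg
    rw [dif_neg hneg]
    have := not_and.mp hneg h
    omega
termination_by pairs.length - i
decreasing_by omega

-- outer while over the pair list, recording the head key of each above-run
def pvRunScan (pairs : List (Int × Int)) (thres : Int) (i : Nat) (result : List Int) : List Int :=
  if h : pvSkipBelow pairs thres i < pairs.length then
    pvRunScan pairs thres (pvSkipAbove pairs thres (pvSkipBelow pairs thres i))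
      (result ++ [(pairs.getD (pvSkipBelow pairs thres i) (0, 0)).1])
  else result
termination_by pairs.length - i
decreasing_by
  have h1 : i ≤ pvSkipBelow pairs thres i := pvSkipBelow_ge pairs thres i
  have h2 : (pairs.getD (pvSkipBelow pairs thres i) (0, 0)).2 > thres :=
    pvSkipBelow_stop pairs thres i h
  have h3 : pvSkipBelow pairs thres i + 1 ≤ pvSkipAbove pairs thres (pvSkipBelow pairs thres i) := by
    rw [pvSkipAbove, dif_pos ⟨h, h2⟩]
    exact pvSkipAbove_ge pairs thres (pvSkipBelow pairs thres i + 1)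
  omega

def get_peak_onsets_alt (keys : List Int) (values : List Int) (thres : Int) : List Int :=
  pvRunScan (keys.zip values) thres 0 []

-- ===== PRECONDITION & SPEC =====
def Spec_get_peak_onsets (keys : List Int) (values : List Int) (thres : Int) (out : List Int) : Prop := out = get_peak_onsets_alt keys values thres
instance (keys : List Int) (values : List Int) (thres : Int) (out : List Int) : Decidable (Spec_get_peak_onsets keys values thres out) := by unfold Spec_get_peak_onsets; infer_instance

-- ===== CLAIM (what is proved, stated in full; the proofs are below) =====
def Claim_equal_get_peak_onsets : Prop := ∀ (keys : List Int) (values : List Int) (thres : Int), Dom_get_peak_onsets keys values thres → Spec_get_peak_onsets keys values thres (get_peak_onsets keys values thres)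

-- ===== LEMMAS AND PROOFS =====

-- reference recursion: onsets of a pair list given the previous above-flag
def specPeaks (thres : Int) (pb : Bool) : List (Int × Int) → List Int
  | [] => []
  | p :: rest =>
      if p.2 > thres ∧ pb = false then p.1 :: specPeaks thres (decide (p.2 > thres)) rest
      else specPeaks thres (decide (p.2 > thres)) rest

theorem foldl_specPeaks (thres : Int) (l : List (Int × Int)) :
    ∀ (pb : Bool) (acc : List Int),
      (l.foldl (fun (st : Bool × List Int) kv =>
          (decide (kv.2 > thres),
           if kv.2 > thres ∧ st.1 = false then st.2 ++ [kv.1] else st.2)) (pb, acc)).2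
        = acc ++ specPeaks thres pb l := by
  induction l with
  | nil => intro pb acc; simp [specPeaks]
  | cons p rest ih =>
      intro pb acc
      simp only [List.foldl_cons, specPeaks]
      by_cases h : p.2 > thres ∧ pb = false
      · simp [h, ih]
      · simp [h, ih]

-- list-level versions of the two skip loops
def pvDropBelow (thres : Int) : List (Int × Int) → List (Int × Int)
  | [] => []
  | p :: rest => if p.2 ≤ thres then pvDropBelow thres rest else p :: rest

def pvDropAbove (thres : Int) : List (Int × Int) → List (Int × Int)
  | [] => []
  | p :: rest => if p.2 > thres then pvDropAbove thres rest else p :: rest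

theorem specPeaks_dropBelow (thres : Int) (l : List (Int × Int)) :
    specPeaks thres false (pvDropBelow thres l) = specPeaks thres false l := by
  induction l with
  | nil => rfl
  | cons p rest ih =>
      rw [pvDropBelow]
      split
      · rename_i hle
        have hngt : ¬ p.2 > thres := by omega
        rw [ih, specPeaks]
        simp [hngt]
      · rfl

theorem specPeaks_true_dropAbove (thres : Int) (l : List (Int × Int)) :
    specPeaks thres false (pvDropAbove thres l) = specPeaks thres true l := by
  induction l with
  | nil => rfl
  | cons p rest ih =>
      rw [pvDropAbove]
      by_cases hgt : p.2 > thres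
      · simp only [hgt, if_pos]
        rw [ih, specPeaks]
        simp [hgt]
      · simp only [hgt, if_neg, not_false_iff]
        rw [specPeaks, specPeaks]
        simp [hgt]

theorem skipBelow_drop (pairs : List (Int × Int)) (thres : Int) (i : Nat) :
    pairs.drop (pvSkipBelow pairs thres i) = pvDropBelow thres (pairs.drop i) := by
  rw [pvSkipBelow]
  split
  · rename_i h
    rw [skipBelow_drop pairs thres (i + 1)]
    rw [List.drop_eq_getElem_cons h.1, pvDropBelow]
    have hv : (pairs.getD i (0, 0)).2 ≤ thres := h.2
    rw [List.getD_eq_getElem pairs (0, 0) h.1] at hv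
    simp [hv]
  · rename_i h
    by_cases hi : i < pairs.length
    · have hv : ¬ (pairs.getD i (0, 0)).2 ≤ thres := fun hle => h ⟨hi, hle⟩
      rw [List.getD_eq_getElem pairs (0, 0) hi] at hv
      rw [List.drop_eq_getElem_cons hi, pvDropBelow]
      simp [hv]
    · rw [List.drop_eq_nil_of_le (by omega)]
      rfl
termination_by pairs.length - i
decreasing_by omega

theorem skipAbove_drop (pairs : List (Int × Int)) (thres : Int) (i : Nat) :
    pairs.drop (pvSkipAbove pairs thres i) = pvDropAbove thres (pairs.drop i) := by
  rw [pvSkipAbove]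
  split
  · rename_i h
    rw [skipAbove_drop pairs thres (i + 1)]
    rw [List.drop_eq_getElem_cons h.1, pvDropAbove]
    have hv : (pairs.getD i (0, 0)).2 > thres := h.2
    rw [List.getD_eq_getElem pairs (0, 0) h.1] at hv
    simp [hv]
  · rename_i h
    by_cases hi : i < pairs.length
    · have hv : ¬ (pairs.getD i (0, 0)).2 > thres := fun hgt => h ⟨hi, hgt⟩
      rw [List.getD_eq_getElem pairs (0, 0) hi] at hv
      rw [List.drop_eq_getElem_cons hi, pvDropAbove]
      simp [hv]
    · rw [List.drop_eq_nil_of_le (by omega)]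
      rfl
termination_by pairs.length - i
decreasing_by omega

theorem runScan_eq_specPeaks (pairs : List (Int × Int)) (thres : Int) (i : Nat)
    (result : List Int) :
    pvRunScan pairs thres i result = result ++ specPeaks thres false (pairs.drop i) := by
  rw [pvRunScan]
  split
  · rename_i h
    have hj := skipBelow_drop pairs thres i
    have hgt : (pairs.getD (pvSkipBelow pairs thres i) (0, 0)).2 > thres :=
      pvSkipBelow_stop pairs thres i h
    have hstep : pvSkipBelow pairs thres i + 1 ≤ pvSkipAbove pairs thres (pvSkipBelow pairs thres i) := by
      rw [pvSkipAbove, dif_pos ⟨h, hgt⟩]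
      exact pvSkipAbove_ge pairs thres (pvSkipBelow pairs thres i + 1)
    rw [runScan_eq_specPeaks pairs thres (pvSkipAbove pairs thres (pvSkipBelow pairs thres i))
      (result ++ [(pairs.getD (pvSkipBelow pairs thres i) (0, 0)).1])]
    rw [← specPeaks_dropBelow thres (pairs.drop i), ← hj]
    rw [List.drop_eq_getElem_cons h]
    rw [List.getD_eq_getElem pairs (0, 0) h] at hgt ⊢
    rw [specPeaks]
    simp only [hgt, and_true, if_pos]
    rw [skipAbove_drop]
    rw [List.drop_eq_getElem_cons h, pvDropAbove]
    simp [hgt, specPeaks_true_dropAbove]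
  · rename_i h
    have hj := skipBelow_drop pairs thres i
    have hnil : pairs.drop (pvSkipBelow pairs thres i) = [] :=
      List.drop_eq_nil_of_le (by omega)
    rw [← specPeaks_dropBelow thres (pairs.drop i), ← hj, hnil]
    simp [specPeaks]
termination_by pairs.length - i
decreasing_by
  have h1 : i ≤ pvSkipBelow pairs thres i := pvSkipBelow_ge pairs thres i
  omega

-- ===== VERDICT (by name: the statement is the Claim_ definition above) =====
theorem get_peak_onsets_spec : Claim_equal_get_peak_onsets := by
  intro keys values thres _
  unfold Spec_get_peak_onsets get_peak_onsets get_peak_onsets_alt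
  rw [foldl_specPeaks, runScan_eq_specPeaks]
  simp
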